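-- pv_equiv track=rewrite | github.com/Jiahuiche/SBC-MENU | api_clips.py | classify_by_season_simple
-- ===== SOURCE A (Python) =====
-- def classify_by_season_simple(ingredients_list):
--
--     # Key seasonal ingredients (one word matches)
--     seasonal_ingredients = {
--         'spring': {'asparagus', 'artichoke', 'rhubarb', 'pea', 'radish', 'spinach', 'fava bean'},
--         'summer': {'berry', 'peach', 'watermelon', 'corn', 'fig', 'zucchini', 'nectarine'},
--         'fall': {'pumpkin', 'squash', 'cranberry','brussel sprout', 'sweet potato', 'persimmon', 'chestnut'},
--         'winter': {'citrus', 'pomegranate', 'kale', 'collard', 'leek', 'parsnip', 'turnip'}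
--     }
--
--     found_seasons = set()
--
--     for ingredient in ingredients_list:
--         ingredient_lower = ingredient.lower()
--
--         # Check each word in the ingredient name
--         words = ingredient_lower.split()
--
--         for word in words:
--             for season, ingredients in seasonal_ingredients.items():
--                 if word in ingredients:
--                     found_seasons.add(season)
--
--     # Return results based on the three cases
--     if len(found_seasons) == 1:
--         # Only one season found
--         season = list(found_seasons)[0]
--         return [season], season.capitalize()
--
--     else:
--         # No seasonal ingredients found
--         return ['any-season'], "Any season"
-- ===== SOURCE B (Python) =====
-- def classify_by_season_simple(ingredients_list):
--     seasonal_ingredients = {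
--         'spring': {'asparagus', 'artichoke', 'rhubarb', 'pea', 'radish', 'spinach', 'fava bean'},
--         'summer': {'berry', 'peach', 'watermelon', 'corn', 'fig', 'zucchini', 'nectarine'},
--         'fall': {'pumpkin', 'squash', 'cranberry', 'brussel sprout', 'sweet potato', 'persimmon', 'chestnut'},
--         'winter': {'citrus', 'pomegranate', 'kale', 'collard', 'leek', 'parsnip', 'turnip'}
--     }
--
--     # Phase 1: collect every word of every ingredient once.
--     all_words = set()
--     for ingredient in ingredients_list:
--         for word in ingredient.lower().split():
--             all_words.add(word)
--
--     # Phase 2: one intersection test per season.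
--     found_seasons = [season for season, ingredients in seasonal_ingredients.items()
--                      if all_words & ingredients]
--
--     if len(found_seasons) == 1:
--         season = found_seasons[0]
--         return [season], season.capitalize()
--     else:
--         return ['any-season'], "Any season"
-- ===== Notes on version B (the rewrite author's own statement) =====
-- stated objective: alternative
-- what changed: B first builds one set of all lowercased words across all ingredients, then decides each season by a single set intersection, instead of A's per-word inner scan over every season set for every word of every ingredient.
import Mathlib
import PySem

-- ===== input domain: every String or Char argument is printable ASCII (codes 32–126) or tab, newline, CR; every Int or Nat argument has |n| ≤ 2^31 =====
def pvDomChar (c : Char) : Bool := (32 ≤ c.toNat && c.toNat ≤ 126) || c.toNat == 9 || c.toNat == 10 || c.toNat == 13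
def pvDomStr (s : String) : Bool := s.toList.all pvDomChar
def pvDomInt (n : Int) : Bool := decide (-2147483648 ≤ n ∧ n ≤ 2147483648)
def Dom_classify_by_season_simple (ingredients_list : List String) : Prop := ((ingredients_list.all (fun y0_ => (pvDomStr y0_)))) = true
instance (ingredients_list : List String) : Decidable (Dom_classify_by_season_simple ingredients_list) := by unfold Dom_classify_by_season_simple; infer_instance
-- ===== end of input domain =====

-- B replaces A's per-word scan over every season set by one word-collection pass
-- followed by a single set-intersection test per season (alternative decomposition, same result).


-- ===== PORT A =====
-- the seasonal_ingredients dict, shared literal data of both sources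
def pvSeasons : List (String × PySem.Set String) :=
  [("spring", PySem.Set.ofList ["asparagus", "artichoke", "rhubarb", "pea", "radish", "spinach", "fava bean"]),
   ("summer", PySem.Set.ofList ["berry", "peach", "watermelon", "corn", "fig", "zucchini", "nectarine"]),
   ("fall",   PySem.Set.ofList ["pumpkin", "squash", "cranberry", "brussel sprout", "sweet potato", "persimmon", "chestnut"]),
   ("winter", PySem.Set.ofList ["citrus", "pomegranate", "kale", "collard", "leek", "parsnip", "turnip"])]

-- s.capitalize(): first char uppercased, rest lowered — exact on the ASCII domain
def pvCapitalize (s : String) : String :=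
  match s.toList with
  | [] => ""
  | c :: cs => String.ofList (PySem.Chars.upperChar c :: cs.map PySem.Chars.lowerChar)

-- ingredient.lower().split(), shared by both ports
def pvWords (ingredient : String) : List String := PySem.Str.split₀ (PySem.Str.lower ingredient)

-- A's loop nest: for ingredient … for word … for season, ingredients …
def pvFoundA (ingredients_list : List String) : PySem.Set String :=
  ingredients_list.foldl (fun fs ingredient =>
    (pvWords ingredient).foldl (fun fs word =>
      pvSeasons.foldl (fun fs si =>
        if PySem.Set.contains si.2 word then PySem.Set.add fs si.1 else fs) fs) fs)
    PySem.Set.empty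

def classify_by_season_simple (ingredients_list : List String) : List String × String :=
  if PySem.Set.len (pvFoundA ingredients_list) == 1 then
    -- list(found_seasons)[0]: the set has exactly one element, so order-independent
    match pvFoundA ingredients_list with
    | season :: _ => ([season], pvCapitalize season)
    | [] => (["any-season"], "Any season")  -- unreachable: len = 1
  else
    (["any-season"], "Any season")

-- ===== PORT B =====
-- Phase 1: collect every word of every ingredient once
def pvAllWords (ingredients_list : List String) : PySem.Set String :=
  ingredients_list.foldl (fun aw ingredient => (pvWords ingredient).foldl PySem.Set.add aw)
    PySem.Set.empty

-- Phase 2: one intersection test per season (the list comprehension)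
def pvFoundB (ingredients_list : List String) : List String :=
  pvSeasons.filterMap (fun si =>
    if PySem.Set.inter (pvAllWords ingredients_list) si.2 ≠ [] then some si.1 else none)

def classify_by_season_simple_alt (ingredients_list : List String) : List String × String :=
  match pvFoundB ingredients_list with
  | [season] => ([season], pvCapitalize season)
  | _ => (["any-season"], "Any season")

-- ===== PRECONDITION & SPEC =====
def Spec_classify_by_season_simple (ingredients_list : List String) (out : List String × String) : Prop := out = classify_by_season_simple_alt ingredients_list
instance (ingredients_list : List String) (out : List String × String) : Decidable (Spec_classify_by_season_simple ingredients_list out) := by unfold Spec_classify_by_season_simple; infer_instance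

-- ===== CLAIM (what is proved, stated in full; the proofs are below) =====
def Claim_equal_classify_by_season_simple : Prop := ∀ (ingredients_list : List String), Dom_classify_by_season_simple ingredients_list → Spec_classify_by_season_simple ingredients_list (classify_by_season_simple ingredients_list)

-- ===== LEMMAS AND PROOFS =====

-- membership in A's inner fold over the seasons
theorem memA_seasons (ps : List (String × PySem.Set String)) (fs : PySem.Set String) (w x : String) :
    x ∈ ps.foldl (fun fs si => if PySem.Set.contains si.2 w then PySem.Set.add fs si.1 else fs) fs ↔
      x ∈ fs ∨ ∃ si ∈ ps, w ∈ si.2 ∧ x = si.1 := by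
  induction ps generalizing fs with
  | nil => simp
  | cons p ps ih =>
    rw [List.foldl_cons]
    by_cases h : PySem.Set.contains p.2 w = true
    · rw [if_pos h, ih]
      have hw : w ∈ p.2 := (PySem.Set.contains_iff _ _).mp h
      simp only [PySem.Set.mem_add, List.mem_cons]
      constructor
      · rintro ((h1 | rfl) | ⟨si, hsi, hm, hx⟩)
        · exact Or.inl h1
        · exact Or.inr ⟨p, Or.inl rfl, hw, rfl⟩
        · exact Or.inr ⟨si, Or.inr hsi, hm, hx⟩
      · rintro (h1 | ⟨si, (rfl | hsi), hm, hx⟩)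
        · exact Or.inl (Or.inl h1)
        · exact Or.inl (Or.inr hx)
        · exact Or.inr ⟨si, hsi, hm, hx⟩
    · rw [if_neg h, ih]
      have hw : w ∉ p.2 := fun hm => h ((PySem.Set.contains_iff _ _).mpr hm)
      simp only [List.mem_cons]
      constructor
      · rintro (h1 | ⟨si, hsi, hm, hx⟩)
        · exact Or.inl h1
        · exact Or.inr ⟨si, Or.inr hsi, hm, hx⟩
      · rintro (h1 | ⟨si, (rfl | hsi), hm, hx⟩)
        · exact Or.inl h1
        · exact absurd hm hw
        · exact Or.inr ⟨si, hsi, hm, hx⟩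

-- membership in A's fold over the words of one ingredient
theorem memA_words (ws : List String) (fs : PySem.Set String) (x : String) :
    x ∈ ws.foldl (fun fs word =>
        pvSeasons.foldl (fun fs si => if PySem.Set.contains si.2 word then PySem.Set.add fs si.1 else fs) fs) fs ↔
      x ∈ fs ∨ ∃ w ∈ ws, ∃ si ∈ pvSeasons, w ∈ si.2 ∧ x = si.1 := by
  induction ws generalizing fs with
  | nil => simp
  | cons w ws ih =>
    rw [List.foldl_cons, ih, memA_seasons]
    simp only [List.mem_cons]
    constructor
    · rintro ((h1 | h2) | ⟨w', hw', rest⟩)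
      · exact Or.inl h1
      · exact Or.inr ⟨w, Or.inl rfl, h2⟩
      · exact Or.inr ⟨w', Or.inr hw', rest⟩
    · rintro (h1 | ⟨w', (rfl | hw'), rest⟩)
      · exact Or.inl (Or.inl h1)
      · exact Or.inl (Or.inr rest)
      · exact Or.inr ⟨w', hw', rest⟩

-- membership in A's outer fold
theorem memA_found (l : List String) (x : String) :
    x ∈ pvFoundA l ↔ ∃ ing ∈ l, ∃ w ∈ pvWords ing, ∃ si ∈ pvSeasons, w ∈ si.2 ∧ x = si.1 := by
  unfold pvFoundA
  have key : ∀ (l : List String) (fs : PySem.Set String),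
      x ∈ l.foldl (fun fs ingredient =>
          (pvWords ingredient).foldl (fun fs word =>
            pvSeasons.foldl (fun fs si => if PySem.Set.contains si.2 word then PySem.Set.add fs si.1 else fs) fs) fs) fs ↔
        x ∈ fs ∨ ∃ ing ∈ l, ∃ w ∈ pvWords ing, ∃ si ∈ pvSeasons, w ∈ si.2 ∧ x = si.1 := by
    intro l
    induction l with
    | nil => simp
    | cons ing l ih =>
      intro fs
      rw [List.foldl_cons, ih, memA_words]
      simp only [List.mem_cons]
      constructor
      · rintro ((h1 | h2) | ⟨i', hi', rest⟩)
        · exact Or.inl h1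
        · exact Or.inr ⟨ing, Or.inl rfl, h2⟩
        · exact Or.inr ⟨i', Or.inr hi', rest⟩
      · rintro (h1 | ⟨i', (rfl | hi'), rest⟩)
        · exact Or.inl (Or.inl h1)
        · exact Or.inl (Or.inr rest)
        · exact Or.inr ⟨i', hi', rest⟩
  rw [key]
  simp [PySem.Set.empty]

-- A's fold keeps the Set nodup
theorem nodupA_seasons (ps : List (String × PySem.Set String)) (fs : PySem.Set String) (w : String)
    (h : fs.Nodup) :
    (ps.foldl (fun fs si => if PySem.Set.contains si.2 w then PySem.Set.add fs si.1 else fs) fs).Nodup := by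
  induction ps generalizing fs with
  | nil => exact h
  | cons p ps ih =>
    rw [List.foldl_cons]
    apply ih
    split
    · exact PySem.Set.nodup_add _ _ h
    · exact h

theorem nodupA_found (l : List String) : (pvFoundA l).Nodup := by
  unfold pvFoundA
  have key : ∀ (l : List String) (fs : PySem.Set String), fs.Nodup →
      (l.foldl (fun fs ingredient =>
          (pvWords ingredient).foldl (fun fs word =>
            pvSeasons.foldl (fun fs si => if PySem.Set.contains si.2 word then PySem.Set.add fs si.1 else fs) fs) fs) fs).Nodup := by
    intro l
    induction l with
    | nil => exact fun _ h => h
    | cons ing l ih =>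
      intro fs h
      rw [List.foldl_cons]
      apply ih
      generalize pvWords ing = ws
      induction ws generalizing fs with
      | nil => exact h
      | cons w ws ihw => exact ihw _ (nodupA_seasons _ _ _ h)
  exact key l _ List.nodup_nil

-- membership in B's all_words
theorem memB_allwords (l : List String) (x : String) :
    x ∈ pvAllWords l ↔ ∃ ing ∈ l, x ∈ pvWords ing := by
  unfold pvAllWords
  have inner : ∀ (ws : List String) (aw : PySem.Set String),
      x ∈ ws.foldl PySem.Set.add aw ↔ x ∈ aw ∨ x ∈ ws := by
    intro ws
    induction ws with
    | nil => simp
    | cons w ws ih =>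
      intro aw
      rw [List.foldl_cons, ih]
      simp only [PySem.Set.mem_add, List.mem_cons]
      tauto
  have key : ∀ (l : List String) (aw : PySem.Set String),
      x ∈ l.foldl (fun aw ingredient => (pvWords ingredient).foldl PySem.Set.add aw) aw ↔
        x ∈ aw ∨ ∃ ing ∈ l, x ∈ pvWords ing := by
    intro l
    induction l with
    | nil => simp
    | cons ing l ih =>
      intro aw
      rw [List.foldl_cons, ih, inner]
      simp only [List.mem_cons]
      constructor
      · rintro ((h1 | h2) | ⟨i', hi', hw⟩)
        · exact Or.inl h1
        · exact Or.inr ⟨ing, Or.inl rfl, h2⟩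
        · exact Or.inr ⟨i', Or.inr hi', hw⟩
      · rintro (h1 | ⟨i', (rfl | hi'), hw⟩)
        · exact Or.inl (Or.inl h1)
        · exact Or.inl (Or.inr hw)
        · exact Or.inr ⟨i', hi', hw⟩
  rw [key]
  simp [PySem.Set.empty]

-- membership in B's comprehension result
theorem memB_found (l : List String) (x : String) :
    x ∈ pvFoundB l ↔ ∃ si ∈ pvSeasons, (∃ w, w ∈ pvAllWords l ∧ w ∈ si.2) ∧ x = si.1 := by
  unfold pvFoundB
  rw [List.mem_filterMap]
  constructor
  · rintro ⟨si, hsi, hf⟩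
    split at hf
    · next hne =>
      cases hf
      rcases List.exists_mem_of_ne_nil _ hne with ⟨w, hw⟩
      rw [PySem.Set.mem_inter] at hw
      exact ⟨si, hsi, ⟨w, hw⟩, rfl⟩
    · cases hf
  · rintro ⟨si, hsi, ⟨w, hw1, hw2⟩, rfl⟩
    refine ⟨si, hsi, ?_⟩
    rw [if_pos]
    intro hnil
    have : w ∈ PySem.Set.inter (pvAllWords l) si.2 := (PySem.Set.mem_inter _ _ _).mpr ⟨hw1, hw2⟩
    rw [hnil] at this
    exact absurd this (List.not_mem_nil)

-- B's comprehension keeps the four distinct season names nodup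
theorem nodupB_found (l : List String) : (pvFoundB l).Nodup := by
  unfold pvFoundB
  have key : ∀ (ps : List (String × PySem.Set String)), (ps.map Prod.fst).Nodup →
      (ps.filterMap (fun si =>
        if PySem.Set.inter (pvAllWords l) si.2 ≠ [] then some si.1 else none)).Nodup := by
    intro ps
    induction ps with
    | nil => simp
    | cons p ps ih =>
      intro h
      simp only [List.map_cons, List.nodup_cons] at h
      by_cases hc : PySem.Set.inter (pvAllWords l) p.2 ≠ []
      · simp only [List.filterMap_cons, if_pos hc]
        rw [List.nodup_cons]
        refine ⟨?_, ih h.2⟩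
        intro hmem
        rcases List.mem_filterMap.mp hmem with ⟨si, hsi, hf⟩
        by_cases hc2 : PySem.Set.inter (pvAllWords l) si.2 ≠ []
        · rw [if_pos hc2] at hf
          exact h.1 (List.mem_map.mpr ⟨si, hsi, Option.some.inj hf⟩)
        · rw [if_neg hc2] at hf
          cases hf
      · simp only [List.filterMap_cons, if_neg hc]
        exact ih h.2
  exact key pvSeasons (by decide)

-- the two found-season collections are permutations of one another
theorem foundA_perm_foundB (l : List String) : (pvFoundA l).Perm (pvFoundB l) := by
  rw [List.perm_ext_iff_of_nodup (nodupA_found l) (nodupB_found l)]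
  intro x
  rw [memA_found, memB_found]
  constructor
  · rintro ⟨ing, hing, w, hw, si, hsi, hm, rfl⟩
    exact ⟨si, hsi, ⟨w, (memB_allwords l w).mpr ⟨ing, hing, hw⟩, hm⟩, rfl⟩
  · rintro ⟨si, hsi, ⟨w, hw1, hw2⟩, rfl⟩
    rcases (memB_allwords l w).mp hw1 with ⟨ing, hing, hw⟩
    exact ⟨ing, hing, w, hw, si, hsi, hw2, rfl⟩

-- ===== VERDICT (by name: the statement is the Claim_ definition above) =====
theorem classify_by_season_simple_spec : Claim_equal_classify_by_season_simple := by
  intro l _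
  unfold Spec_classify_by_season_simple classify_by_season_simple classify_by_season_simple_alt
  have hp := foundA_perm_foundB l
  by_cases h1 : (pvFoundA l).length = 1
  · obtain ⟨s, hs⟩ := List.length_eq_one_iff.mp h1
    have hB : pvFoundB l = [s] := List.perm_singleton.mp (hs ▸ hp.symm)
    rw [hs, hB]
    simp [PySem.Set.len]
  · have hlen : (pvFoundB l).length = (pvFoundA l).length := hp.length_eq.symm
    have hcond : (PySem.Set.len (pvFoundA l) == 1) = false := by
      simp only [PySem.Set.len, beq_eq_false_iff_ne, ne_eq]
      omega
    rw [hcond]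
    simp only [Bool.false_eq_true, if_false]
    rcases hfb : pvFoundB l with _ | ⟨a, _ | ⟨b, t⟩⟩
    · rfl
    · rw [hfb] at hlen; simp at hlen; omega
    · rfl
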